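-- pv_equiv track=rewrite | github.com/AlmondNMT/423 | python3_scripts/mcounter.py | mcount
-- ===== SOURCE A (Python) =====
-- def mcount(n):
--     counter = 0
--     for l in range(1, n + 1):
--         for i in range(1, n - l + 2):
--             j = i + l - 1
--             for k in range(i, j):
--                 counter += 1
--     return counter
-- ===== SOURCE B (Python) =====
-- def mcount(n):
--     m = n if n > 0 else 0
--     return (m * m * m - m) // 6
-- ===== Notes on version B (the rewrite author's own statement) =====
-- stated objective: faster
-- what changed: replaced the triple nested loop (which just counts iterations) by the closed-form formula sum_{l=1}^{n}(n-l+1)(l-1) = (n^3-n)/6, clamped at 0 for n <= 0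
import Mathlib
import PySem

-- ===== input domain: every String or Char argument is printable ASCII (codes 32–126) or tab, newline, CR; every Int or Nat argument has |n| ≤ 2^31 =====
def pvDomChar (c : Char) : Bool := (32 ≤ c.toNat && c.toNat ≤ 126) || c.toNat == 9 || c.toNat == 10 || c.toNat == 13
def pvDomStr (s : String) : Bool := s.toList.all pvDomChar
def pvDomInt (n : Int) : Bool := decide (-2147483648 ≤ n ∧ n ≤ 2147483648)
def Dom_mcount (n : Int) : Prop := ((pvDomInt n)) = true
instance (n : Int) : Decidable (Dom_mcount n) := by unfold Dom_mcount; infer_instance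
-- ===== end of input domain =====

-- B replaces A's triple nested counting loop by the closed form (n^3 - n)/6 (0 for n ≤ 0): O(1) instead of O(n^3).

-- ===== PORT A =====
def mcount (n : Int) : Int :=
  (PySem.List.pyRange 1 (n + 1) 1).foldl (fun counter l =>
    (PySem.List.pyRange 1 (n - l + 2) 1).foldl (fun counter i =>
      let j := i + l - 1
      (PySem.List.pyRange i j 1).foldl (fun counter _k => counter + 1) counter) counter) 0

-- ===== PORT B =====
def mcount_alt (n : Int) : Int :=
  let m := if n > 0 then n else 0
  (m * m * m - m) / 6

-- ===== PRECONDITION & SPEC =====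
def Spec_mcount (n : Int) (out : Int) : Prop := out = mcount_alt n
instance (n : Int) (out : Int) : Decidable (Spec_mcount n out) := by unfold Spec_mcount; infer_instance

-- ===== CLAIM (what is proved, stated in full; the proofs are below) =====
def Claim_equal_mcount : Prop := ∀ (n : Int), Dom_mcount n → Spec_mcount n (mcount n)

-- ===== LEMMAS AND PROOFS =====

-- innermost loop: adds 1 per element, i.e. the length of the range
theorem inner_loop (c i j : Int) :
    (PySem.List.pyRange i j 1).foldl (fun counter _k => counter + 1) c
      = c + ((j - i).toNat : Int) := by
  rw [PySem.List.foldl_add (g := fun _ => (1 : Int))]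
  rw [PySem.List.sum_map_const_int]
  simp [PySem.List.length_pyRange_one]

-- middle loop: adds (l-1) per i, for (n-l+1) values of i
theorem mid_loop (n l c : Int) :
    (PySem.List.pyRange 1 (n - l + 2) 1).foldl
      (fun counter i => counter + (((i + l - 1) - i).toNat : Int)) c
      = c + ((n - l + 1).toNat : Int) * ((l - 1).toNat : Int) := by
  have h : (fun (counter : Int) (i : Int) => counter + (((i + l - 1) - i).toNat : Int))
      = fun counter _ => counter + ((l - 1).toNat : Int) := by
    funext counter i
    congr 2
    omega
  rw [h, PySem.List.foldl_add (g := fun _ => ((l - 1).toNat : Int))]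
  rw [PySem.List.sum_map_const_int]
  rw [PySem.List.length_pyRange_one]
  have : (n - l + 2 - 1).toNat = (n - l + 1).toNat := by omega
  rw [this, mul_comm]

-- the sum Σ_{l=1}^{N} (M-l+1)(l-1), generalized over the upper coefficient M for the induction
theorem sum_form (N : ℕ) (M : Int) :
    ((PySem.List.pyRange 1 ((N : Int) + 1) 1).map (fun l => (M - l + 1) * (l - 1))).sum * 6
      = 3 * (M + 1) * N * (N - 1) - 2 * N * ((N : Int) * N - 1) := by
  induction N with
  | zero => simp [PySem.List.pyRange_one_eq_nil]
  | succ k ih =>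
    have h1 : ((k : Int) + 1 + 1) = ((k : Int) + 1) + 1 := by ring
    have h2 : (1 : Int) ≤ (k : Int) + 1 := by omega
    push_cast
    rw [h1, PySem.List.pyRange_one_succ_right h2]
    rw [List.map_append, List.sum_append]
    simp only [List.map_cons, List.map_nil, List.sum_cons, List.sum_nil]
    push_cast at ih
    nlinarith [ih]

theorem mcount_eq_sum (n : Int) :
    mcount n = ((PySem.List.pyRange 1 (n + 1) 1).map
      (fun l => (n - l + 1) * (l - 1))).sum := by
  unfold mcount
  have step1 : ∀ (counter l : Int),
      (PySem.List.pyRange 1 (n - l + 2) 1).foldl (fun counter i =>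
        (PySem.List.pyRange i (i + l - 1) 1).foldl (fun counter _k => counter + 1) counter) counter
      = counter + ((n - l + 1).toNat : Int) * ((l - 1).toNat : Int) := by
    intro counter l
    rw [PySem.List.foldl_congr_mem _ _
      (fun counter i => counter + (((i + l - 1) - i).toNat : Int)) _
      (by intro acc x _; rw [inner_loop])]
    exact mid_loop n l counter
  show (PySem.List.pyRange 1 (n + 1) 1).foldl (fun counter l =>
      (PySem.List.pyRange 1 (n - l + 2) 1).foldl (fun counter i =>
        (PySem.List.pyRange i (i + l - 1) 1).foldl (fun counter _k => counter + 1) counter)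
        counter) 0 = _
  rw [PySem.List.foldl_congr_mem _ _
      (fun counter l => counter + ((n - l + 1).toNat : Int) * ((l - 1).toNat : Int)) _
      (by intro acc x _; exact step1 acc x)]
  rw [PySem.List.foldl_add (g := fun l => ((n - l + 1).toNat : Int) * ((l - 1).toNat : Int))]
  rw [zero_add]
  apply congrArg List.sum
  apply List.map_congr_left
  intro l hl
  rw [PySem.List.mem_pyRange_one] at hl
  have h1 : ((n - l + 1).toNat : Int) = n - l + 1 := by omega
  have h2 : ((l - 1).toNat : Int) = l - 1 := by omega
  rw [h1, h2]

-- ===== VERDICT (by name: the statement is the Claim_ definition above) =====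
theorem mcount_spec : Claim_equal_mcount := by
  intro n _
  unfold Spec_mcount mcount_alt
  rw [mcount_eq_sum]
  by_cases hn : n > 0
  · simp only [hn, if_pos]
    obtain ⟨N, hN⟩ : ∃ N : ℕ, n = (N : Int) := ⟨n.toNat, by omega⟩
    subst hN
    have h := sum_form N (N : Int)
    have h6 : ((N : Int) * N * N - N)
        = ((PySem.List.pyRange 1 ((N : Int) + 1) 1).map
            (fun l => ((N : Int) - l + 1) * (l - 1))).sum * 6 := by nlinarith [h]
    rw [h6, Int.mul_ediv_cancel _ (by norm_num : (6:Int) ≠ 0)]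
  · have hle : n + 1 ≤ 1 := by omega
    rw [PySem.List.pyRange_one_eq_nil hle]
    simp [hn]
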